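-- pv_equiv track=rewrite | github.com/nauvalrajwaa/HELIOS | organelle_pipeline/isomer.py | _count_hits
-- ===== SOURCE A (Python) =====
-- def _count_hits(sequence: str, kmer_set: set[str], kmer_size: int) -> int:
--     if len(sequence) < kmer_size or not kmer_set:
--         return 0
--     hits = 0
--     for index in range(0, len(sequence) - kmer_size + 1):
--         if sequence[index : index + kmer_size] in kmer_set:
--             hits += 1
--     return hits
-- ===== SOURCE B (Python) =====
-- def _count_hits(sequence: str, kmer_set: set[str], kmer_size: int) -> int:
--     if not kmer_set:
--         return 0
--     counts = {}
--     for i in range(len(sequence) - kmer_size + 1):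
--         w = sequence[i : i + kmer_size]
--         counts[w] = counts.get(w, 0) + 1
--     return sum(c for w, c in counts.items() if w in kmer_set)
-- ===== Notes on version B (the rewrite author's own statement) =====
-- stated objective: alternative
-- what changed: B aggregates all windows into a frequency dictionary first and then sums the counts of the distinct windows that belong to kmer_set, instead of A's interleaved scan-and-test counter with guard clauses.
import Mathlib
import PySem

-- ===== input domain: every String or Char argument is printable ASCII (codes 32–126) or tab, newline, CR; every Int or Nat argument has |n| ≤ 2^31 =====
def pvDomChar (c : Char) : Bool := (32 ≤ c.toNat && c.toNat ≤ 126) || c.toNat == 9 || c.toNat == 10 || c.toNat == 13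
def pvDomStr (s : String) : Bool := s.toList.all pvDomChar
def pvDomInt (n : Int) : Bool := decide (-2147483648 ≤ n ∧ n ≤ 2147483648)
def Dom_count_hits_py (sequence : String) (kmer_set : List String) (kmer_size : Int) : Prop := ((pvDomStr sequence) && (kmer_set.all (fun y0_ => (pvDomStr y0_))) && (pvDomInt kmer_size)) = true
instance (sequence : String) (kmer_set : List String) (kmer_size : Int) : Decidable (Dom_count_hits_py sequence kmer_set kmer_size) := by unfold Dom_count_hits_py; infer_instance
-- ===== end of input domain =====

-- B builds a window-frequency dictionary first and then sums the counts of the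
-- distinct windows lying in kmer_set (alternative decomposition, same result).

-- ===== PORT A =====
def count_hits_py (sequence : String) (kmer_set : List String) (kmer_size : Int) : Int :=
  if PySem.Str.len sequence < kmer_size ∨ kmer_set = [] then 0
  else
    (PySem.List.pyRange 0 (PySem.Str.len sequence - kmer_size + 1) 1).foldl
      (fun hits index =>
        if PySem.Set.contains kmer_set
            (PySem.Str.slice sequence (some index) (some (index + kmer_size)))
        then hits + 1 else hits) 0

-- ===== PORT B =====
def count_hits_py_alt (sequence : String) (kmer_set : List String) (kmer_size : Int) : Int :=
  if kmer_set = [] then 0 else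
  let counts : PySem.Dict String Int :=
    (PySem.List.pyRange 0 (PySem.Str.len sequence - kmer_size + 1) 1).foldl
      (fun d i =>
        let w := PySem.Str.slice sequence (some i) (some (i + kmer_size))
        d.insert w (d.getD w 0 + 1)) PySem.Dict.empty
  counts.items.foldl
    (fun acc p => if PySem.Set.contains kmer_set p.1 then acc + p.2 else acc) 0

-- ===== PRECONDITION & SPEC =====
def Spec_count_hits_py (sequence : String) (kmer_set : List String) (kmer_size : Int) (out : Int) : Prop := out = count_hits_py_alt sequence kmer_set kmer_size
instance (sequence : String) (kmer_set : List String) (kmer_size : Int) (out : Int) : Decidable (Spec_count_hits_py sequence kmer_set kmer_size out) := by unfold Spec_count_hits_py; infer_instance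

-- ===== CLAIM (what is proved, stated in full; the proofs are below) =====
def Claim_equal_count_hits_py : Prop := ∀ (sequence : String) (kmer_set : List String) (kmer_size : Int), Dom_count_hits_py sequence kmer_set kmer_size → Spec_count_hits_py sequence kmer_set kmer_size (count_hits_py sequence kmer_set kmer_size)

-- ===== LEMMAS AND PROOFS =====

-- A's counting loop is countP of the window list.
theorem pv_foldl_count (P : String → Bool) (ws : List String) (acc : Int) :
    ws.foldl (fun a w => if P w then a + 1 else a) acc = acc + (ws.countP P : Int) := by
  induction ws generalizing acc with
  | nil => simp
  | cons w ws ih =>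
      simp only [List.foldl_cons, List.countP_cons, ih]
      by_cases h : P w <;> simp [h] <;> push_cast <;> ring

-- split a countP at the occurrences of one element
theorem pv_countP_split (P : String → Bool) (d : String) (ws : List String) :
    ws.countP P =
      (if P d then ws.count d else 0) + (ws.filter (fun w => ¬ w = d)).countP P := by
  induction ws with
  | nil => simp
  | cons w ws ih =>
      by_cases hw : w = d
      · subst hw
        by_cases hP : P w <;>
          simp [List.countP_cons, hP, ih] <;> omega
      · by_cases hP : P w <;>
          simp [List.countP_cons, hw, hP, ih] <;>
          split_ifs <;> omega

-- B's summation over the distinct keys equals countP of the multiset of windows.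
theorem pv_sum_counts (P : String → Bool) (ds : List String) (hnd : ds.Nodup) :
    ∀ (ws : List String), (∀ w ∈ ws, w ∈ ds) → ∀ (acc : Int),
      ds.foldl (fun a k => if P k then a + (ws.count k : Int) else a) acc
        = acc + (ws.countP P : Int) := by
  induction ds with
  | nil =>
      intro ws hmem acc
      have : ws = [] := by
        cases ws with
        | nil => rfl
        | cons w ws => exact absurd (hmem w (by simp)) (by simp)
      simp [this]
  | cons d ds ih =>
      intro ws hmem acc
      have hnd' : ds.Nodup := hnd.of_cons
      have hdd : d ∉ ds := by simpa using (List.nodup_cons.mp hnd).1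
      set ws' := ws.filter (fun w => ¬ w = d) with hws'
      have hmem' : ∀ w ∈ ws', w ∈ ds := by
        intro w hw
        have h1 := List.of_mem_filter hw
        have h2 := hmem w (List.mem_of_mem_filter hw)
        simp only [decide_not, Bool.not_eq_true', decide_eq_false_iff_not] at h1
        rcases (List.mem_cons.mp h2) with h | h
        · exact absurd h h1
        · exact h
      have hcnt : ∀ (a : Int), ∀ k ∈ ds,
          (if P k then a + (ws.count k : Int) else a)
            = (if P k then a + (ws'.count k : Int) else a) := by
        intro a k hk
        have hkd : ¬ k = d := fun h => hdd (h ▸ hk)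
        rw [hws', List.count_filter (by simp [hkd])]
      simp only [List.foldl_cons]
      rw [PySem.List.foldl_congr_mem ds _ _ _ hcnt]
      rw [ih hnd' ws' hmem']
      have hsplit := pv_countP_split P d ws
      rw [← hws'] at hsplit
      rw [hsplit]
      by_cases hP : P d <;> simp [hP] <;> ring

-- the two loop shapes compute the same number
theorem pv_bridge (P : String → Bool) (win : Int → String) (r : List Int) :
    (r.foldl (fun d i => PySem.Dict.insert d (win i) (PySem.Dict.getD d (win i) 0 + 1))
        (PySem.Dict.empty : PySem.Dict String Int)).items.foldl
      (fun acc p => if P p.1 then acc + p.2 else acc) 0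
      = r.foldl (fun hits i => if P (win i) then hits + 1 else hits) 0 := by
  have h1 : r.foldl (fun d i => PySem.Dict.insert d (win i) (PySem.Dict.getD d (win i) 0 + 1))
      (PySem.Dict.empty : PySem.Dict String Int) = PySem.Dict.counter (r.map win) := by
    rw [← PySem.Dict.foldl_insert_getD_add_one_eq_counter, List.foldl_map]
  calc List.foldl (fun (acc : Int) (p : String × Int) => if P p.1 then acc + p.2 else acc) 0
        ((r.foldl (fun d i => PySem.Dict.insert d (win i) (PySem.Dict.getD d (win i) 0 + 1))
          (PySem.Dict.empty : PySem.Dict String Int)).items)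
      = 0 + ((r.map win).countP P : Int) := by
        rw [h1, PySem.Dict.items_counter, List.foldl_map]
        exact pv_sum_counts P _ (PySem.Set.nodup_ofList _) (r.map win)
          (fun w hw => (PySem.Set.mem_ofList _ _).mpr hw) 0
    _ = (r.map win).foldl (fun a w => if P w then a + 1 else a) 0 :=
        (pv_foldl_count P (r.map win) 0).symm
    _ = r.foldl (fun hits i => if P (win i) then hits + 1 else hits) 0 := List.foldl_map

-- ===== VERDICT (by name: the statement is the Claim_ definition above) =====
theorem count_hits_py_spec : Claim_equal_count_hits_py := by
  intro sequence kmer_set kmer_size _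
  unfold Spec_count_hits_py
  simp only [count_hits_py, count_hits_py_alt]
  by_cases hk : kmer_set = []
  · simp [hk]
  · rw [if_neg hk]
    refine Eq.trans ?_ (pv_bridge (fun w => PySem.Set.contains kmer_set w)
        (fun i => PySem.Str.slice sequence (some i) (some (i + kmer_size)))
        (PySem.List.pyRange 0 (PySem.Str.len sequence - kmer_size + 1) 1)).symm
    split_ifs with h
    · rcases h with h | h
      · rw [PySem.List.pyRange_one_eq_nil (by omega)]
        simp
      · exact absurd h hk
    · rfl
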